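-- pv_equiv track=rewrite | github.com/Fabien-data/AI-Recruitment-System | Chatbot/whatsapp-recruitment-bot/app/chatbot.py | _get_default_role_questions
-- ===== SOURCE A (Python) =====
-- def _get_default_role_questions(job_title: str, job_category: str = "") -> list:
--     """
--     Return a sensible list of screening fields to ask when no specific requirements
--     are configured in the DB for the matched job.  Always returns at least a couple
--     of items so candidates feel they are being properly screened.
--     """
--     title_lower = (job_title or "").lower()
--     cat_lower = (job_category or "").lower()
--
--     # Medical / healthcare roles
--     if any(kw in title_lower or kw in cat_lower for kw in
--            ['nurs', 'doctor', 'physician', 'midwife', 'paramedic', 'pharmacist',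
--             'therapist', 'caregiver', 'care assistant', 'ward', 'medical', 'health']):
--         return ['nursing_license', 'qualification_level', 'passport_status']
--
--     # Driver roles
--     if any(kw in title_lower for kw in
--            ['driver', 'chauffeur', 'operator', 'forklift']):
--         return ['license_type', 'passport_status']
--
--     # IT / software (checked before generic 'engineer' to avoid mis-match)
--     if any(kw in title_lower or kw in cat_lower for kw in
--            ['software', 'developer', 'programmer', 'data ', 'data science',
--             'network', ' it ', 'information technology', 'cyber', 'devops']):
--         return ['english_proficiency', 'passport_status']
--
--     # Construction / technical trades
--     if any(kw in title_lower or kw in cat_lower for kw in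
--            ['construct', 'mason', 'welder', 'carpenter', 'electrician', 'plumber',
--             'mechanic', 'technician', 'engineer', 'fabricat', 'steel', 'scaffold']):
--         return ['technical_certification', 'passport_status']
--
--     # Hospitality / hotel / cleaning
--     if any(kw in title_lower or kw in cat_lower for kw in
--            ['hotel', 'hospitality', 'housekeep', 'steward', 'waiter', 'chef',
--             'cook', 'kitchen', 'cleaner', 'laundry']):
--         return ['english_proficiency', 'passport_status']
--
--     # Security
--     if any(kw in title_lower or kw in cat_lower for kw in
--            ['security', 'guard', 'bodyguar']):
--         return ['height_cm', 'passport_status']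
--
--     # Generic fallback — always ask at least about passport and availability
--     return ['passport_status', 'availability']
-- ===== SOURCE B (Python) =====
-- # Different algorithm: instead of testing each keyword with a substring scan, build a
-- # keyword -> priority hash index once and enumerate the substrings of the text (at the
-- # keyword lengths only), taking the MINIMUM matching priority; the inner keyword scan
-- # disappears.  The driver group (priority 1) is indexed for the title only.
--
-- _RESULTS = [
--     ['nursing_license', 'qualification_level', 'passport_status'],      # 0 medical
--     ['license_type', 'passport_status'],                                # 1 driver (title only)
--     ['english_proficiency', 'passport_status'],                         # 2 IT
--     ['technical_certification', 'passport_status'],                     # 3 construction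
--     ['english_proficiency', 'passport_status'],                         # 4 hospitality
--     ['height_cm', 'passport_status'],                                   # 5 security
--     ['passport_status', 'availability'],                                # 6 generic fallback
-- ]
--
-- _GROUPS = [
--     ['nurs', 'doctor', 'physician', 'midwife', 'paramedic', 'pharmacist',
--      'therapist', 'caregiver', 'care assistant', 'ward', 'medical', 'health'],
--     ['driver', 'chauffeur', 'operator', 'forklift'],
--     ['software', 'developer', 'programmer', 'data ', 'data science',
--      'network', ' it ', 'information technology', 'cyber', 'devops'],
--     ['construct', 'mason', 'welder', 'carpenter', 'electrician', 'plumber',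
--      'mechanic', 'technician', 'engineer', 'fabricat', 'steel', 'scaffold'],
--     ['hotel', 'hospitality', 'housekeep', 'steward', 'waiter', 'chef',
--      'cook', 'kitchen', 'cleaner', 'laundry'],
--     ['security', 'guard', 'bodyguar'],
-- ]
--
-- # keyword -> priority index; the category text must not trigger the driver group
-- _TITLE_KW = {kw: p for p, kws in enumerate(_GROUPS) for kw in kws}
-- _CAT_KW = {kw: p for p, kws in enumerate(_GROUPS) for kw in kws if p != 1}
-- _LENS = sorted({len(kw) for kw in _TITLE_KW})
--
--
-- def _best(text, table):
--     """Smallest priority whose keyword occurs in text (6 if none)."""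
--     best = 6
--     for i in range(len(text)):
--         for L in _LENS:
--             p = table.get(text[i:i + L])
--             if p is not None and p < best:
--                 best = p
--     return best
--
--
-- def _get_default_role_questions(job_title: str, job_category: str = "") -> list:
--     tl = (job_title or "").lower()
--     cl = (job_category or "").lower()
--     return _RESULTS[min(_best(tl, _TITLE_KW), _best(cl, _CAT_KW))]
-- ===== Notes on version B (the rewrite author's own statement) =====
-- stated objective: alternative
-- what changed: Replaces the per-keyword substring scans of A's six if-ladders with a keyword->priority hash index built once; B enumerates the text's substrings at the keyword lengths, looks each up in the index, takes the minimum matching priority and returns the result table entry at that priority.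
import Mathlib
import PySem

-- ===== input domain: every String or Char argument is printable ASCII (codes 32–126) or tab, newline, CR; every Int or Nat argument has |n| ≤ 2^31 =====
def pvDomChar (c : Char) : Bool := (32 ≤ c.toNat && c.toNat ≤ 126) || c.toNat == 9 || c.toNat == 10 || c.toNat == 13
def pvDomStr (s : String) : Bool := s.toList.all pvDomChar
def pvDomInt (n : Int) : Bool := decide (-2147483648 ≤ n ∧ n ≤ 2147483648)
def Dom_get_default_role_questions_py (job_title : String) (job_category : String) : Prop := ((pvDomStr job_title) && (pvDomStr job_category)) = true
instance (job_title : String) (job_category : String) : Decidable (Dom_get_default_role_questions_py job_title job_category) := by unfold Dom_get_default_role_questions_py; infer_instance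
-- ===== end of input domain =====

-- B replaces A's six per-keyword substring-scan if-ladders by a keyword→priority hash index
-- built once; B enumerates the text's substrings at the keyword lengths, looks each up in
-- the index and returns the result-table entry at the minimum matching priority
-- (objective: alternative algorithm; same results).

-- ===== PORT A =====
-- literal transliteration: six `any(...)` ladders in source order, on code points
-- (`(s or "").lower()` = lower of s: the empty string is falsy and "".lower() = "")
def get_default_role_questions_py (job_title : String) (job_category : String) : List String :=
  let title_lower := PySem.Chars.lower job_title.toList
  let cat_lower := PySem.Chars.lower job_category.toList
  if (["nurs", "doctor", "physician", "midwife", "paramedic", "pharmacist",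
       "therapist", "caregiver", "care assistant", "ward", "medical", "health"]).any
      (fun kw => PySem.Chars.isIn kw.toList title_lower || PySem.Chars.isIn kw.toList cat_lower) then
    ["nursing_license", "qualification_level", "passport_status"]
  else if (["driver", "chauffeur", "operator", "forklift"]).any
      (fun kw => PySem.Chars.isIn kw.toList title_lower) then
    ["license_type", "passport_status"]
  else if (["software", "developer", "programmer", "data ", "data science",
            "network", " it ", "information technology", "cyber", "devops"]).any
      (fun kw => PySem.Chars.isIn kw.toList title_lower || PySem.Chars.isIn kw.toList cat_lower) then
    ["english_proficiency", "passport_status"]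
  else if (["construct", "mason", "welder", "carpenter", "electrician", "plumber",
            "mechanic", "technician", "engineer", "fabricat", "steel", "scaffold"]).any
      (fun kw => PySem.Chars.isIn kw.toList title_lower || PySem.Chars.isIn kw.toList cat_lower) then
    ["technical_certification", "passport_status"]
  else if (["hotel", "hospitality", "housekeep", "steward", "waiter", "chef",
            "cook", "kitchen", "cleaner", "laundry"]).any
      (fun kw => PySem.Chars.isIn kw.toList title_lower || PySem.Chars.isIn kw.toList cat_lower) then
    ["english_proficiency", "passport_status"]
  else if (["security", "guard", "bodyguar"]).any
      (fun kw => PySem.Chars.isIn kw.toList title_lower || PySem.Chars.isIn kw.toList cat_lower) then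
    ["height_cm", "passport_status"]
  else
    ["passport_status", "availability"]

-- ===== PORT B =====
-- _RESULTS: one result list per priority 0–5, fallback at index 6
def pvResults : List (List String) :=
  [["nursing_license", "qualification_level", "passport_status"],
   ["license_type", "passport_status"],
   ["english_proficiency", "passport_status"],
   ["technical_certification", "passport_status"],
   ["english_proficiency", "passport_status"],
   ["height_cm", "passport_status"],
   ["passport_status", "availability"]]

-- _GROUPS: the keyword group of each priority 0–5
def pvGroups : List (List String) :=
  [["nurs", "doctor", "physician", "midwife", "paramedic", "pharmacist",
    "therapist", "caregiver", "care assistant", "ward", "medical", "health"],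
   ["driver", "chauffeur", "operator", "forklift"],
   ["software", "developer", "programmer", "data ", "data science",
    "network", " it ", "information technology", "cyber", "devops"],
   ["construct", "mason", "welder", "carpenter", "electrician", "plumber",
    "mechanic", "technician", "engineer", "fabricat", "steel", "scaffold"],
   ["hotel", "hospitality", "housekeep", "steward", "waiter", "chef",
    "cook", "kitchen", "cleaner", "laundry"],
   ["security", "guard", "bodyguar"]]

-- _TITLE_KW = {kw: p for p, kws in enumerate(_GROUPS) for kw in kws}
def pvTitleKW : PySem.Dict (List Char) Int :=
  PySem.Dict.ofList ((PySem.List.enumerate pvGroups).flatMap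
    (fun pk => pk.2.map (fun kw => (kw.toList, pk.1))))

-- _CAT_KW = {kw: p for p, kws in enumerate(_GROUPS) for kw in kws if p != 1}
def pvCatKW : PySem.Dict (List Char) Int :=
  PySem.Dict.ofList ((PySem.List.enumerate pvGroups).flatMap
    (fun pk => if pk.1 ≠ 1 then pk.2.map (fun kw => (kw.toList, pk.1)) else []))

-- _LENS = sorted({len(kw) for kw in _TITLE_KW})
def pvLens : List Int :=
  PySem.List.sorted (PySem.Set.ofList (pvTitleKW.keys.map PySem.List.len)) (fun L => L)

-- inner loop body of _best: p = table.get(text[i:i+L]); if p is not None and p < best: best = p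
def pvInner (text : List Char) (table : PySem.Dict (List Char) Int) (i : Int)
    (best : Int) (L : Int) : Int :=
  match table.get? (PySem.List.slice text (some i) (some (i + L))) with
  | some p => if p < best then p else best
  | none => best

-- _best(text, table)
def pvBest (text : List Char) (table : PySem.Dict (List Char) Int) : Int :=
  (PySem.List.pyRange 0 (PySem.List.len text) 1).foldl
    (fun best i => pvLens.foldl (pvInner text table i) best) 6

-- _RESULTS[min(_best(tl, _TITLE_KW), _best(cl, _CAT_KW))]; the index is always 0–6,
-- so pyGet? is always `some` and the .getD [] default is unreachable
def get_default_role_questions_py_alt (job_title : String) (job_category : String) : List String :=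
  let tl := PySem.Chars.lower job_title.toList
  let cl := PySem.Chars.lower job_category.toList
  (PySem.List.pyGet? pvResults (min (pvBest tl pvTitleKW) (pvBest cl pvCatKW))).getD []

-- ===== PRECONDITION & SPEC =====
def Spec_get_default_role_questions_py (job_title : String) (job_category : String) (out : List String) : Prop := out = get_default_role_questions_py_alt job_title job_category
instance (job_title : String) (job_category : String) (out : List String) : Decidable (Spec_get_default_role_questions_py job_title job_category out) := by unfold Spec_get_default_role_questions_py; infer_instance

-- ===== CLAIM (what is proved, stated in full; the proofs are below) =====
def Claim_equal_get_default_role_questions_py : Prop := ∀ (job_title : String) (job_category : String), Dom_get_default_role_questions_py job_title job_category → Spec_get_default_role_questions_py job_title job_category (get_default_role_questions_py job_title job_category)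

-- ===== LEMMAS AND PROOFS =====

-- literal forms of the two dictionaries and of the length list (proved by evaluation)
def pvTitleLit : PySem.Dict (List Char) Int := PySem.Dict.mk [("nurs".toList, 0),
   ("doctor".toList, 0),
   ("physician".toList, 0),
   ("midwife".toList, 0),
   ("paramedic".toList, 0),
   ("pharmacist".toList, 0),
   ("therapist".toList, 0),
   ("caregiver".toList, 0),
   ("care assistant".toList, 0),
   ("ward".toList, 0),
   ("medical".toList, 0),
   ("health".toList, 0),
   ("driver".toList, 1),
   ("chauffeur".toList, 1),
   ("operator".toList, 1),
   ("forklift".toList, 1),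
   ("software".toList, 2),
   ("developer".toList, 2),
   ("programmer".toList, 2),
   ("data ".toList, 2),
   ("data science".toList, 2),
   ("network".toList, 2),
   (" it ".toList, 2),
   ("information technology".toList, 2),
   ("cyber".toList, 2),
   ("devops".toList, 2),
   ("construct".toList, 3),
   ("mason".toList, 3),
   ("welder".toList, 3),
   ("carpenter".toList, 3),
   ("electrician".toList, 3),
   ("plumber".toList, 3),
   ("mechanic".toList, 3),
   ("technician".toList, 3),
   ("engineer".toList, 3),
   ("fabricat".toList, 3),
   ("steel".toList, 3),
   ("scaffold".toList, 3),
   ("hotel".toList, 4),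
   ("hospitality".toList, 4),
   ("housekeep".toList, 4),
   ("steward".toList, 4),
   ("waiter".toList, 4),
   ("chef".toList, 4),
   ("cook".toList, 4),
   ("kitchen".toList, 4),
   ("cleaner".toList, 4),
   ("laundry".toList, 4),
   ("security".toList, 5),
   ("guard".toList, 5),
   ("bodyguar".toList, 5)]

def pvCatLit : PySem.Dict (List Char) Int := PySem.Dict.mk [("nurs".toList, 0),
   ("doctor".toList, 0),
   ("physician".toList, 0),
   ("midwife".toList, 0),
   ("paramedic".toList, 0),
   ("pharmacist".toList, 0),
   ("therapist".toList, 0),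
   ("caregiver".toList, 0),
   ("care assistant".toList, 0),
   ("ward".toList, 0),
   ("medical".toList, 0),
   ("health".toList, 0),
   ("software".toList, 2),
   ("developer".toList, 2),
   ("programmer".toList, 2),
   ("data ".toList, 2),
   ("data science".toList, 2),
   ("network".toList, 2),
   (" it ".toList, 2),
   ("information technology".toList, 2),
   ("cyber".toList, 2),
   ("devops".toList, 2),
   ("construct".toList, 3),
   ("mason".toList, 3),
   ("welder".toList, 3),
   ("carpenter".toList, 3),
   ("electrician".toList, 3),
   ("plumber".toList, 3),
   ("mechanic".toList, 3),
   ("technician".toList, 3),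
   ("engineer".toList, 3),
   ("fabricat".toList, 3),
   ("steel".toList, 3),
   ("scaffold".toList, 3),
   ("hotel".toList, 4),
   ("hospitality".toList, 4),
   ("housekeep".toList, 4),
   ("steward".toList, 4),
   ("waiter".toList, 4),
   ("chef".toList, 4),
   ("cook".toList, 4),
   ("kitchen".toList, 4),
   ("cleaner".toList, 4),
   ("laundry".toList, 4),
   ("security".toList, 5),
   ("guard".toList, 5),
   ("bodyguar".toList, 5)]

set_option maxRecDepth 40000 in
set_option maxHeartbeats 1000000 in
lemma pvTitleKW_eq : pvTitleKW = pvTitleLit := by decide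

set_option maxRecDepth 40000 in
set_option maxHeartbeats 1000000 in
lemma pvCatKW_eq : pvCatKW = pvCatLit := by decide

set_option maxRecDepth 40000 in
set_option maxHeartbeats 1000000 in
lemma pvLens_eq : pvLens = [4, 5, 6, 7, 8, 9, 10, 11, 12, 14, 22] := by decide

lemma pvLens_nonneg : ∀ L ∈ pvLens, (0:Int) ≤ L := by
  simp only [pvLens_eq]; decide

-- generic facts about the min-accumulating fold loops of _best
lemma pvFoldl_le_init {α : Type} (g : Int → α → Int) (h : ∀ b x, g b x ≤ b) :
    ∀ (l : List α) (b : Int), l.foldl g b ≤ b := by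
  intro l
  induction l with
  | nil => intro b; simp
  | cons x xs ih => intro b; exact le_trans (ih (g b x)) (h b x)

lemma pvFoldl_le_of_mem {α : Type} (g : Int → α → Int) (h : ∀ b x, g b x ≤ b)
    {l : List α} {x : α} (hx : x ∈ l) {c : Int} (hc : ∀ b, g b x ≤ c) :
    ∀ b, l.foldl g b ≤ c := by
  induction l with
  | nil => cases hx
  | cons y ys ih =>
    intro b
    rcases List.mem_cons.mp hx with rfl | hm
    · exact le_trans (pvFoldl_le_init g h ys (g b x)) (hc b)
    · exact ih hm (g b y)

lemma pvFoldl_preserve {α : Type} (P : Int → Prop) (g : Int → α → Int) (l : List α)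
    (h : ∀ b x, x ∈ l → P b → P (g b x)) : ∀ b, P b → P (l.foldl g b) := by
  induction l with
  | nil => intro b hb; simpa using hb
  | cons y ys ih =>
    intro b hb
    exact ih (fun b x hx => h b x (List.mem_cons_of_mem _ hx)) _
      (h b y List.mem_cons_self hb)

lemma pvInner_le (text : List Char) (table : PySem.Dict (List Char) Int) (i : Int)
    (b L : Int) : pvInner text table i b L ≤ b := by
  unfold pvInner
  cases table.get? (PySem.List.slice text (some i) (some (i + L))) with
  | none => exact le_refl b
  | some p => dsimp only; split <;> omega

-- upper bound: a table keyword occurring in the text bounds pvBest by its priority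
lemma pvBest_le (text : List Char) (table : PySem.Dict (List Char) Int)
    (kw : List Char) (p : Int) (hget : table.get? kw = some p) (hne : kw ≠ [])
    (hlen : ((kw.length : Int)) ∈ pvLens) (hinf : kw <:+: text) :
    pvBest text table ≤ p := by
  obtain ⟨s, t, hst⟩ := hinf
  have houter : ∀ b, pvLens.foldl (pvInner text table (s.length : Int)) b ≤ p := by
    apply pvFoldl_le_of_mem _ (fun b L => pvInner_le text table _ b L) hlen
    intro b
    have hslice : PySem.List.slice text (some (s.length : Int))
        (some ((s.length : Int) + (kw.length : Int))) = kw := by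
      rw [PySem.List.slice_natCast_add]
      rw [← hst, List.append_assoc, List.drop_left, List.take_left]
    unfold pvInner
    rw [hslice, hget]
    dsimp only; split <;> omega
  have hmem : (s.length : Int) ∈ PySem.List.pyRange 0 (PySem.List.len text) 1 := by
    rw [PySem.List.mem_pyRange_one]
    have hlt : text.length = s.length + (kw.length + t.length) := by
      rw [← hst]; simp
    have hk : 0 < kw.length := List.length_pos_iff.mpr hne
    simp only [PySem.List.len_eq]
    omega
  exact pvFoldl_le_of_mem _
    (fun b i => pvFoldl_le_init _ (fun b L => pvInner_le text table i b L) pvLens b)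
    hmem houter 6

-- every keyword of a group is in the corresponding table with its priority
lemma pvExists_le (text : List Char) (table : PySem.Dict (List Char) Int)
    (kws : List String) (p : Int)
    (hfacts : ∀ kw ∈ kws, table.get? kw.toList = some p ∧ kw.toList ≠ [] ∧
      ((kw.toList.length : Int)) ∈ pvLens)
    (h : ∃ kw ∈ kws, kw.toList <:+: text) : pvBest text table ≤ p := by
  obtain ⟨kw, hkw, hinf⟩ := h
  obtain ⟨h1, h2, h3⟩ := hfacts kw hkw
  exact pvBest_le text table kw.toList p h1 h2 h3 hinf

set_option maxRecDepth 40000 in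
lemma pvFactsT : ∀ pr ∈ PySem.List.enumerate pvGroups, ∀ kw ∈ pr.2,
    pvTitleKW.get? kw.toList = some pr.1 ∧ kw.toList ≠ [] ∧
      ((kw.toList.length : Int)) ∈ pvLens := by
  simp only [pvTitleKW_eq, pvLens_eq]; decide

set_option maxRecDepth 40000 in
lemma pvFactsC : ∀ pr ∈ PySem.List.enumerate pvGroups, pr.1 ≠ 1 → ∀ kw ∈ pr.2,
    pvCatKW.get? kw.toList = some pr.1 ∧ kw.toList ≠ [] ∧
      ((kw.toList.length : Int)) ∈ pvLens := by
  simp only [pvCatKW_eq, pvLens_eq]; decide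

-- classification of the table entries: priority range and originating group
set_option maxRecDepth 40000 in
lemma pvTitle_items_class : ∀ pr ∈ pvTitleLit.items,
    (0 ≤ pr.2 ∧ pr.2 ≤ 5) ∧ ∃ kw ∈ pvGroups.getD pr.2.toNat [], kw.toList = pr.1 := by
  decide

set_option maxRecDepth 40000 in
lemma pvCat_items_class : ∀ pr ∈ pvCatLit.items,
    (0 ≤ pr.2 ∧ pr.2 ≤ 5 ∧ pr.2 ≠ 1) ∧ ∃ kw ∈ pvGroups.getD pr.2.toNat [], kw.toList = pr.1 := by
  decide

-- completeness: pvBest is 6 or a table value whose keyword occurs in the text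
def pvGood (text : List Char) (table : PySem.Dict (List Char) Int) (x : Int) : Prop :=
  x = 6 ∨ ∃ kw, table.get? kw = some x ∧ kw <:+: text

lemma pvSlice_infix (text : List Char) (i L : Int) (hi : 0 ≤ i) (hL : 0 ≤ L) :
    PySem.List.slice text (some i) (some (i + L)) <:+: text := by
  rw [PySem.List.slice_toNat text hi (by omega)]
  exact (List.take_prefix _ _).isInfix.trans (List.drop_suffix _ _).isInfix

lemma pvBest_good (text : List Char) (table : PySem.Dict (List Char) Int) :
    pvGood text table (pvBest text table) := by
  unfold pvBest
  apply pvFoldl_preserve (pvGood text table)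
  · intro b i hi hb
    have hi0 : 0 ≤ i := (PySem.List.mem_pyRange_one.mp hi).1
    apply pvFoldl_preserve (pvGood text table)
    · intro b' L hL hb'
      have hL0 : 0 ≤ L := pvLens_nonneg L hL
      unfold pvInner
      cases hg : table.get? (PySem.List.slice text (some i) (some (i + L))) with
      | none => exact hb'
      | some p =>
        dsimp only
        split
        · exact Or.inr ⟨_, hg, pvSlice_infix text i L hi0 hL0⟩
        · exact hb'
    · exact hb
  · exact Or.inl rfl

-- Bool condition of an A-ladder branch as a proposition
lemma pvAny_iff (kws : List String) (t c : List Char) :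
    (kws.any (fun kw => PySem.Chars.isIn kw.toList t || PySem.Chars.isIn kw.toList c) = true)
    ↔ (∃ kw ∈ kws, kw.toList <:+: t) ∨ (∃ kw ∈ kws, kw.toList <:+: c) := by
  simp only [List.any_eq_true, Bool.or_eq_true, PySem.Chars.isIn_iff_infix]
  constructor
  · rintro ⟨kw, hkw, h | h⟩
    · exact Or.inl ⟨kw, hkw, h⟩
    · exact Or.inr ⟨kw, hkw, h⟩
  · rintro (⟨kw, hkw, h⟩ | ⟨kw, hkw, h⟩)
    · exact ⟨kw, hkw, Or.inl h⟩
    · exact ⟨kw, hkw, Or.inr h⟩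

lemma pvAny1_iff (kws : List String) (t : List Char) :
    (kws.any (fun kw => PySem.Chars.isIn kw.toList t) = true)
    ↔ ∃ kw ∈ kws, kw.toList <:+: t := by
  simp only [List.any_eq_true, PySem.Chars.isIn_iff_infix]

set_option maxRecDepth 40000 in
lemma pvMain (job_title job_category : String) :
    get_default_role_questions_py job_title job_category
      = get_default_role_questions_py_alt job_title job_category := by
  unfold get_default_role_questions_py get_default_role_questions_py_alt
  dsimp only
  set tl := PySem.Chars.lower job_title.toList with htl
  set cl := PySem.Chars.lower job_category.toList with hcl
  set x := pvBest tl pvTitleKW with hx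
  set y := pvBest cl pvCatKW with hy
  -- completeness characterizations
  have Gx : x = 6 ∨ (0 ≤ x ∧ x ≤ 5 ∧ ∃ kw ∈ pvGroups.getD x.toNat [], kw.toList <:+: tl) := by
    rcases pvBest_good tl pvTitleKW with h6 | ⟨kw, hget, hinf⟩
    · exact Or.inl h6
    · rw [pvTitleKW_eq] at hget
      have hm := PySem.Dict.mem_items_of_get?_eq_some pvTitleLit hget
      obtain ⟨⟨hb0, hb5⟩, kw', hkw', hkeq⟩ := pvTitle_items_class (kw, x) hm
      exact Or.inr ⟨hb0, hb5, kw', hkw', by rw [hkeq]; exact hinf⟩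
  have Gy : y = 6 ∨ (0 ≤ y ∧ y ≤ 5 ∧ y ≠ 1 ∧ ∃ kw ∈ pvGroups.getD y.toNat [], kw.toList <:+: cl) := by
    rcases pvBest_good cl pvCatKW with h6 | ⟨kw, hget, hinf⟩
    · exact Or.inl h6
    · rw [pvCatKW_eq] at hget
      have hm := PySem.Dict.mem_items_of_get?_eq_some pvCatLit hget
      obtain ⟨⟨hb0, hb5, hne1⟩, kw', hkw', hkeq⟩ := pvCat_items_class (kw, y) hm
      exact Or.inr ⟨hb0, hb5, hne1, kw', hkw', by rw [hkeq]; exact hinf⟩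
  -- upper bounds per branch
  have bT0 := fun h => pvExists_le tl pvTitleKW ["nurs", "doctor", "physician", "midwife", "paramedic", "pharmacist", "therapist", "caregiver", "care assistant", "ward", "medical", "health"] 0 (pvFactsT ((0:Int), ["nurs", "doctor", "physician", "midwife", "paramedic", "pharmacist", "therapist", "caregiver", "care assistant", "ward", "medical", "health"]) (by decide)) h
  have bC0 := fun h => pvExists_le cl pvCatKW ["nurs", "doctor", "physician", "midwife", "paramedic", "pharmacist", "therapist", "caregiver", "care assistant", "ward", "medical", "health"] 0 (pvFactsC ((0:Int), ["nurs", "doctor", "physician", "midwife", "paramedic", "pharmacist", "therapist", "caregiver", "care assistant", "ward", "medical", "health"]) (by decide) (by decide)) h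
  have bT1 := fun h => pvExists_le tl pvTitleKW ["driver", "chauffeur", "operator", "forklift"] 1 (pvFactsT ((1:Int), ["driver", "chauffeur", "operator", "forklift"]) (by decide)) h
  have bT2 := fun h => pvExists_le tl pvTitleKW ["software", "developer", "programmer", "data ", "data science", "network", " it ", "information technology", "cyber", "devops"] 2 (pvFactsT ((2:Int), ["software", "developer", "programmer", "data ", "data science", "network", " it ", "information technology", "cyber", "devops"]) (by decide)) h
  have bC2 := fun h => pvExists_le cl pvCatKW ["software", "developer", "programmer", "data ", "data science", "network", " it ", "information technology", "cyber", "devops"] 2 (pvFactsC ((2:Int), ["software", "developer", "programmer", "data ", "data science", "network", " it ", "information technology", "cyber", "devops"]) (by decide) (by decide)) h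
  have bT3 := fun h => pvExists_le tl pvTitleKW ["construct", "mason", "welder", "carpenter", "electrician", "plumber", "mechanic", "technician", "engineer", "fabricat", "steel", "scaffold"] 3 (pvFactsT ((3:Int), ["construct", "mason", "welder", "carpenter", "electrician", "plumber", "mechanic", "technician", "engineer", "fabricat", "steel", "scaffold"]) (by decide)) h
  have bC3 := fun h => pvExists_le cl pvCatKW ["construct", "mason", "welder", "carpenter", "electrician", "plumber", "mechanic", "technician", "engineer", "fabricat", "steel", "scaffold"] 3 (pvFactsC ((3:Int), ["construct", "mason", "welder", "carpenter", "electrician", "plumber", "mechanic", "technician", "engineer", "fabricat", "steel", "scaffold"]) (by decide) (by decide)) h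
  have bT4 := fun h => pvExists_le tl pvTitleKW ["hotel", "hospitality", "housekeep", "steward", "waiter", "chef", "cook", "kitchen", "cleaner", "laundry"] 4 (pvFactsT ((4:Int), ["hotel", "hospitality", "housekeep", "steward", "waiter", "chef", "cook", "kitchen", "cleaner", "laundry"]) (by decide)) h
  have bC4 := fun h => pvExists_le cl pvCatKW ["hotel", "hospitality", "housekeep", "steward", "waiter", "chef", "cook", "kitchen", "cleaner", "laundry"] 4 (pvFactsC ((4:Int), ["hotel", "hospitality", "housekeep", "steward", "waiter", "chef", "cook", "kitchen", "cleaner", "laundry"]) (by decide) (by decide)) h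
  have bT5 := fun h => pvExists_le tl pvTitleKW ["security", "guard", "bodyguar"] 5 (pvFactsT ((5:Int), ["security", "guard", "bodyguar"]) (by decide)) h
  have bC5 := fun h => pvExists_le cl pvCatKW ["security", "guard", "bodyguar"] 5 (pvFactsC ((5:Int), ["security", "guard", "bodyguar"]) (by decide) (by decide)) h
  split_ifs with h0 h1 h2 h3 h4 h5
  · -- medical
    rw [pvAny_iff] at h0
    have hle : x ≤ 0 ∨ y ≤ 0 := h0.elim (fun h => Or.inl (bT0 h)) (fun h => Or.inr (bC0 h))
    have hm : min x y = 0 := by omega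
    rw [hm]; decide
  · -- driver
    rw [pvAny_iff] at h0
    rw [pvAny1_iff] at h1
    have hle : x ≤ 1 := bT1 h1
    have hx0 : x ≠ 0 := by
      intro he
      rcases Gx with h6 | ⟨_, _, hM⟩
      · omega
      · rw [he] at hM; exact h0 (Or.inl hM)
    have hy0 : y ≠ 0 := by
      intro he
      rcases Gy with h6 | ⟨_, _, _, hM⟩
      · omega
      · rw [he] at hM; exact h0 (Or.inr hM)
    have hy1 : y ≠ 1 := by rcases Gy with h6 | ⟨_, _, h, _⟩ <;> omega
    have hb : (0 ≤ x) ∧ (0 ≤ y) := by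
      constructor
      · rcases Gx with h6 | ⟨h, _⟩ <;> omega
      · rcases Gy with h6 | ⟨h, _⟩ <;> omega
    have hm : min x y = 1 := by omega
    rw [hm]; decide
  · -- IT
    rw [pvAny_iff] at h0 h2
    rw [pvAny1_iff] at h1
    have hle : x ≤ 2 ∨ y ≤ 2 := h2.elim (fun h => Or.inl (bT2 h)) (fun h => Or.inr (bC2 h))
    have hxlb : 2 ≤ x := by
      rcases Gx with h6 | ⟨hb0, hb5, hM⟩
      · omega
      · rcases (by omega : x = 0 ∨ x = 1 ∨ 2 ≤ x) with he | he | he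
        · rw [he] at hM; exact absurd (Or.inl hM) h0
        · rw [he] at hM; exact absurd hM h1
        · exact he
    have hylb : 2 ≤ y := by
      rcases Gy with h6 | ⟨hb0, hb5, hne1, hM⟩
      · omega
      · rcases (by omega : y = 0 ∨ 2 ≤ y) with he | he
        · rw [he] at hM; exact absurd (Or.inr hM) h0
        · exact he
    have hm : min x y = 2 := by omega
    rw [hm]; decide
  · -- construction
    rw [pvAny_iff] at h0 h2 h3
    rw [pvAny1_iff] at h1
    have hle : x ≤ 3 ∨ y ≤ 3 := h3.elim (fun h => Or.inl (bT3 h)) (fun h => Or.inr (bC3 h))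
    have hxlb : 3 ≤ x := by
      rcases Gx with h6 | ⟨hb0, hb5, hM⟩
      · omega
      · rcases (by omega : x = 0 ∨ x = 1 ∨ x = 2 ∨ 3 ≤ x) with he | he | he | he
        · rw [he] at hM; exact absurd (Or.inl hM) h0
        · rw [he] at hM; exact absurd hM h1
        · rw [he] at hM; exact absurd (Or.inl hM) h2
        · exact he
    have hylb : 3 ≤ y := by
      rcases Gy with h6 | ⟨hb0, hb5, hne1, hM⟩
      · omega
      · rcases (by omega : y = 0 ∨ y = 2 ∨ 3 ≤ y) with he | he | he
        · rw [he] at hM; exact absurd (Or.inr hM) h0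
        · rw [he] at hM; exact absurd (Or.inr hM) h2
        · exact he
    have hm : min x y = 3 := by omega
    rw [hm]; decide
  · -- hospitality
    rw [pvAny_iff] at h0 h2 h3 h4
    rw [pvAny1_iff] at h1
    have hle : x ≤ 4 ∨ y ≤ 4 := h4.elim (fun h => Or.inl (bT4 h)) (fun h => Or.inr (bC4 h))
    have hxlb : 4 ≤ x := by
      rcases Gx with h6 | ⟨hb0, hb5, hM⟩
      · omega
      · rcases (by omega : x = 0 ∨ x = 1 ∨ x = 2 ∨ x = 3 ∨ 4 ≤ x) with he | he | he | he | he
        · rw [he] at hM; exact absurd (Or.inl hM) h0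
        · rw [he] at hM; exact absurd hM h1
        · rw [he] at hM; exact absurd (Or.inl hM) h2
        · rw [he] at hM; exact absurd (Or.inl hM) h3
        · exact he
    have hylb : 4 ≤ y := by
      rcases Gy with h6 | ⟨hb0, hb5, hne1, hM⟩
      · omega
      · rcases (by omega : y = 0 ∨ y = 2 ∨ y = 3 ∨ 4 ≤ y) with he | he | he | he
        · rw [he] at hM; exact absurd (Or.inr hM) h0
        · rw [he] at hM; exact absurd (Or.inr hM) h2
        · rw [he] at hM; exact absurd (Or.inr hM) h3
        · exact he
    have hm : min x y = 4 := by omega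
    rw [hm]; decide
  · -- security
    rw [pvAny_iff] at h0 h2 h3 h4 h5
    rw [pvAny1_iff] at h1
    have hle : x ≤ 5 ∨ y ≤ 5 := h5.elim (fun h => Or.inl (bT5 h)) (fun h => Or.inr (bC5 h))
    have hxlb : 5 ≤ x := by
      rcases Gx with h6 | ⟨hb0, hb5, hM⟩
      · omega
      · rcases (by omega : x = 0 ∨ x = 1 ∨ x = 2 ∨ x = 3 ∨ x = 4 ∨ 5 ≤ x) with he | he | he | he | he | he
        · rw [he] at hM; exact absurd (Or.inl hM) h0
        · rw [he] at hM; exact absurd hM h1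
        · rw [he] at hM; exact absurd (Or.inl hM) h2
        · rw [he] at hM; exact absurd (Or.inl hM) h3
        · rw [he] at hM; exact absurd (Or.inl hM) h4
        · exact he
    have hylb : 5 ≤ y := by
      rcases Gy with h6 | ⟨hb0, hb5, hne1, hM⟩
      · omega
      · rcases (by omega : y = 0 ∨ y = 2 ∨ y = 3 ∨ y = 4 ∨ 5 ≤ y) with he | he | he | he | he
        · rw [he] at hM; exact absurd (Or.inr hM) h0
        · rw [he] at hM; exact absurd (Or.inr hM) h2
        · rw [he] at hM; exact absurd (Or.inr hM) h3
        · rw [he] at hM; exact absurd (Or.inr hM) h4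
        · exact he
    have hm : min x y = 5 := by omega
    rw [hm]; decide
  · -- fallback
    rw [pvAny_iff] at h0 h2 h3 h4 h5
    rw [pvAny1_iff] at h1
    have hx6 : x = 6 := by
      rcases Gx with h6 | ⟨hb0, hb5, hM⟩
      · exact h6
      · rcases (by omega : x = 0 ∨ x = 1 ∨ x = 2 ∨ x = 3 ∨ x = 4 ∨ x = 5) with he | he | he | he | he | he
        · rw [he] at hM; exact absurd (Or.inl hM) h0
        · rw [he] at hM; exact absurd hM h1
        · rw [he] at hM; exact absurd (Or.inl hM) h2
        · rw [he] at hM; exact absurd (Or.inl hM) h3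
        · rw [he] at hM; exact absurd (Or.inl hM) h4
        · rw [he] at hM; exact absurd (Or.inl hM) h5
    have hy6 : y = 6 := by
      rcases Gy with h6 | ⟨hb0, hb5, hne1, hM⟩
      · exact h6
      · rcases (by omega : y = 0 ∨ y = 2 ∨ y = 3 ∨ y = 4 ∨ y = 5) with he | he | he | he | he
        · rw [he] at hM; exact absurd (Or.inr hM) h0
        · rw [he] at hM; exact absurd (Or.inr hM) h2
        · rw [he] at hM; exact absurd (Or.inr hM) h3
        · rw [he] at hM; exact absurd (Or.inr hM) h4
        · rw [he] at hM; exact absurd (Or.inr hM) h5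
    rw [hx6, hy6]; decide

-- ===== VERDICT (by name: the statement is the Claim_ definition above) =====
theorem get_default_role_questions_py_spec : Claim_equal_get_default_role_questions_py := by
  intro job_title job_category _
  unfold Spec_get_default_role_questions_py
  exact pvMain job_title job_category
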